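-- pv_equiv track=rewrite | github.com/tdongsi/gtg | codejam/y2018.py | _compute_charge
-- ===== SOURCE A (Python) =====
-- def _compute_charge(program):
--     cur_hit = 1
--     charge = [0] * len(program)
--     for idx, c in enumerate(program):
--         if c == 'C':
--             cur_hit *= 2
--         charge[idx] = cur_hit
--     return charge
-- ===== SOURCE B (Python) =====
-- def _compute_charge(program):
--     total = sum(c == 'C' for c in program)
--     power = 2 ** total
--     out = []
--     for c in reversed(program):
--         out.append(power)
--         if c == 'C':
--             power //= 2
--     out.reverse()
--     return out
-- ===== Notes on version B (the rewrite author's own statement) =====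
-- stated objective: alternative
-- what changed: Instead of a single forward pass doubling a running counter, B first counts the doubling characters, starts from the final total power of two, and builds the output back-to-front by walking the string in reverse and halving at each doubling character, reversing at the end.
import Mathlib
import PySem

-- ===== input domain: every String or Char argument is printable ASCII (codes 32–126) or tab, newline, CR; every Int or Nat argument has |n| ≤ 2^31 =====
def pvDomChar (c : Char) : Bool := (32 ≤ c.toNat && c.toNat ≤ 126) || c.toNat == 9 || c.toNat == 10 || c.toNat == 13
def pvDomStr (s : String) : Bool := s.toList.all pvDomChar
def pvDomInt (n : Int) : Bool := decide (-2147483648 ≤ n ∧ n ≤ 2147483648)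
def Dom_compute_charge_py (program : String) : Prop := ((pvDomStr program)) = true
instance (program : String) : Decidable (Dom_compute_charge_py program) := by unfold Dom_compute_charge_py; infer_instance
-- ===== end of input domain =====

-- B replaces A's forward doubling pass by a different decomposition: count the doubling
-- characters, start from the final total power, build the output back-to-front halving
-- at each such character, and reverse. Same cost, different traversal.

-- ===== PORT A =====
def compute_charge_py (program : String) : List Int :=
  (program.toList.foldl (fun (st : Int × List Int) c =>
      let cur := if c = 'C' then st.1 * 2 else st.1
      (cur, st.2 ++ [cur])) (1, [])).2

-- ===== PORT B =====
def compute_charge_py_alt (program : String) : List Int :=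
  -- total = sum(c == 'C' for c in program)
  let total : Int := program.toList.foldl (fun acc c => if c == 'C' then acc + 1 else acc) 0
  -- power = 2 ** total  (total ≥ 0, so '^' on the Nat exponent is exact)
  -- for c in reversed(program): out.append(power); if c == 'C': power //= 2
  let st := program.toList.reverse.foldl
      (fun (st : Int × List Int) c =>
        (if c = 'C' then PySem.Int.floordiv st.1 2 else st.1, st.2 ++ [st.1]))
      ((2 : Int) ^ total.toNat, [])
  -- out.reverse()
  st.2.reverse

-- ===== PRECONDITION & SPEC =====
def Spec_compute_charge_py (program : String) (out : List Int) : Prop := out = compute_charge_py_alt program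
instance (program : String) (out : List Int) : Decidable (Spec_compute_charge_py program out) := by unfold Spec_compute_charge_py; infer_instance

-- ===== CLAIM (what is proved, stated in full; the proofs are below) =====
def Claim_equal_compute_charge_py : Prop := ∀ (program : String), Dom_compute_charge_py program → Spec_compute_charge_py program (compute_charge_py program)

-- ===== LEMMAS AND PROOFS =====

-- the intended result: running product, doubled at each 'C'
def chargeSpec : Int → List Char → List Int
  | _, [] => []
  | p, c :: cs =>
      (if c = 'C' then p * 2 else p) :: chargeSpec (if c = 'C' then p * 2 else p) cs

-- B's backward emission: emit q, then halve at 'C'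
def fwdHalve : Int → List Char → List Int
  | _, [] => []
  | q, c :: cs => q :: fwdHalve (if c = 'C' then PySem.Int.floordiv q 2 else q) cs

-- running value after B's loop has consumed l
def afterHalve (q : Int) (l : List Char) : Int :=
  l.foldl (fun q c => if c = 'C' then PySem.Int.floordiv q 2 else q) q

theorem pv_A_fold (cs : List Char) : ∀ (p : Int) (acc : List Int),
    (cs.foldl (fun (st : Int × List Int) c =>
        let cur := if c = 'C' then st.1 * 2 else st.1
        (cur, st.2 ++ [cur])) (p, acc)).2 = acc ++ chargeSpec p cs := by
  induction cs with
  | nil => intro p acc; simp [chargeSpec]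
  | cons c cs ih =>
    intro p acc
    simp only [List.foldl_cons, chargeSpec]
    rw [ih]
    by_cases h : c = 'C' <;> simp [h, List.append_assoc]

theorem pv_B_fold (l : List Char) : ∀ (q : Int) (acc : List Int),
    (l.foldl (fun (st : Int × List Int) c =>
        (if c = 'C' then PySem.Int.floordiv st.1 2 else st.1, st.2 ++ [st.1])) (q, acc)).2
      = acc ++ fwdHalve q l := by
  induction l with
  | nil => intro q acc; simp [fwdHalve]
  | cons c l ih =>
    intro q acc
    simp only [List.foldl_cons, fwdHalve]
    rw [ih]
    simp [List.append_assoc]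

theorem pv_fwd_append (l m : List Char) : ∀ (q : Int),
    fwdHalve q (l ++ m) = fwdHalve q l ++ fwdHalve (afterHalve q l) m := by
  induction l with
  | nil => intro q; simp [fwdHalve, afterHalve]
  | cons c l ih =>
    intro q
    simp only [List.cons_append, fwdHalve, afterHalve, List.foldl_cons]
    rw [ih]
    rfl

theorem pv_floordiv_mul_two (x : Int) : PySem.Int.floordiv (x * 2) 2 = x := by
  rw [PySem.Int.floordiv_eq_ediv_of_pos (by norm_num)]
  exact Int.mul_ediv_cancel x (by norm_num)

theorem pv_after_cancel (l : List Char) : ∀ (x : Int),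
    afterHalve (x * 2 ^ (l.count 'C')) l = x := by
  induction l with
  | nil => intro x; simp [afterHalve]
  | cons c l ih =>
    intro x
    simp only [afterHalve, List.foldl_cons] at *
    by_cases h : c = 'C'
    · subst h
      have hc : ('C' :: l).count 'C' = l.count 'C' + 1 := by simp
      rw [hc, pow_succ, ← mul_assoc, if_pos rfl, pv_floordiv_mul_two]
      exact ih x
    · have hc : (c :: l).count 'C' = l.count 'C' := by simp [h]
      rw [hc, if_neg h]
      exact ih x

theorem pv_main (cs : List Char) : ∀ (p : Int),
    fwdHalve (p * 2 ^ (cs.count 'C')) cs.reverse = (chargeSpec p cs).reverse := by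
  induction cs with
  | nil => intro p; simp [fwdHalve, chargeSpec]
  | cons c cs ih =>
    intro p
    have hrev : (c :: cs).reverse = cs.reverse ++ [c] := by simp
    have hcnt : cs.reverse.count 'C' = cs.count 'C' := List.count_reverse ..
    set p' : Int := if c = 'C' then p * 2 else p with hp'
    have hq : p * 2 ^ ((c :: cs).count 'C') = p' * 2 ^ (cs.reverse.count 'C') := by
      rw [hcnt]
      by_cases h : c = 'C'
      · subst h
        rw [hp', if_pos rfl, List.count_cons_self, pow_succ]
        ring
      · rw [hp', if_neg h]
        simp [h]
    rw [hrev, hq, pv_fwd_append, pv_after_cancel, hcnt, ih p']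
    simp [chargeSpec, fwdHalve, hp']

theorem pv_count_fold (cs : List Char) :
    (cs.foldl (fun acc c => if c == 'C' then acc + 1 else acc) (0 : Int)).toNat
      = cs.count 'C' := by
  rw [PySem.List.foldl_beq_add_one]
  simp

-- ===== VERDICT (by name: the statement is the Claim_ definition above) =====
theorem compute_charge_py_spec : Claim_equal_compute_charge_py := by
  intro program _
  unfold Spec_compute_charge_py compute_charge_py compute_charge_py_alt
  dsimp only
  rw [pv_A_fold, pv_B_fold, pv_count_fold]
  have h := pv_main program.toList 1
  rw [one_mul] at h
  simp [h]
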